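-- pv_equiv track=rewrite | github.com/rupeshmohanty/Competitive-programming-problems | GeeksforGeeks/GFG Practice/multipleCounts.py | getMaxandMinProduct
-- ===== SOURCE A (Python) =====
-- def getMaxandMinProduct(A,Q,N,M):
--     count = []
--
--     for i in range(M):
--         c = 0
--         for j in range(N):
--             if A[j] % Q[i] == 0:
--                 c += 1
--
--         count.append(c)
--
--     return count
-- ===== SOURCE B (Python) =====
-- from collections import Counter
--
--
-- def getMaxandMinProduct(A, Q, N, M):
--     freq = Counter(A[j] for j in range(N))
--     cache = {}
--     res = []
--     for i in range(M):
--         q = Q[i]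
--         if q not in cache:
--             cache[q] = sum(c for v, c in freq.items() if v % q == 0)
--         res.append(cache[q])
--     return res
-- ===== Notes on version B (the rewrite author's own statement) =====
-- stated objective: alternative
-- what changed: B builds a Counter of A's processed prefix once and answers each distinct query exactly once (memoized in a dict) by summing multiplicities over the distinct values, instead of rescanning all N elements for every query as A does.
-- outside the precondition, e.g. on getMaxandMinProduct([], [1], 0, 2): A returns [0, 0], B raises IndexError; on getMaxandMinProduct([1], [], 2, 0): A returns [], B raises IndexError
import Mathlib
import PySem

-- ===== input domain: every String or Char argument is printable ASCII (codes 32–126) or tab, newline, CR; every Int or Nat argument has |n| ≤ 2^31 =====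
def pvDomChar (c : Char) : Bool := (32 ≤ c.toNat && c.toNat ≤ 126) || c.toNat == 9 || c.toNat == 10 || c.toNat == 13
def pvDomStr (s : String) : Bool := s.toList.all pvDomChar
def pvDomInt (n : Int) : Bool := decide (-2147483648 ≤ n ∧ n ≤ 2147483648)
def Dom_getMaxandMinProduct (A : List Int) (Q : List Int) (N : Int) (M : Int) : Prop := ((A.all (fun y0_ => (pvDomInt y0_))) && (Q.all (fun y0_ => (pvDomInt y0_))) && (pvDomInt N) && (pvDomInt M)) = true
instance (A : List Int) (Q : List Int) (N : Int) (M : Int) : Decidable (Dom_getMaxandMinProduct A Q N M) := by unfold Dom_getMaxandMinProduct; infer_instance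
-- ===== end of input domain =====

-- B replaces A's per-query rescan of A by a Counter of A[:N] built once plus a per-distinct-query
-- memoized sum over the distinct values (equality of RETURN values is what is proved below).

-- ===== PORT A =====
def getMaxandMinProduct (A : List Int) (Q : List Int) (N : Int) (M : Int) : List Int :=
  (PySem.List.pyRange 0 M 1).foldl
    (fun count i =>
      count ++ [(PySem.List.pyRange 0 N 1).foldl
        (fun c j =>
          if PySem.Int.mod (PySem.List.pyGetD A j 0) (PySem.List.pyGetD Q i 0) = 0 then c + 1
          else c)
        0])
    []

-- ===== PORT B =====
-- sum(c for v, c in items if v % q == 0)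
def pvSumDiv (items : List (Int × Int)) (q : Int) : Int :=
  items.foldl (fun acc p => if PySem.Int.mod p.1 q = 0 then acc + p.2 else acc) 0

-- body of B's loop over the queries: state = (cache, res)
def pvStep (F : Int → Int) (st : PySem.Dict Int Int × List Int) (q : Int) :
    PySem.Dict Int Int × List Int :=
  match st.1.get? q with
  | none => let s := F q; (st.1.insert q s, st.2 ++ [s])
  | some s => (st.1, st.2 ++ [s])

def getMaxandMinProduct_alt (A : List Int) (Q : List Int) (N : Int) (M : Int) : List Int :=
  let freq := PySem.Dict.counter ((PySem.List.pyRange 0 N 1).map (fun j => PySem.List.pyGetD A j 0))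
  ((PySem.List.pyRange 0 M 1).foldl
      (fun st i => pvStep (fun q => pvSumDiv freq.items q) st (PySem.List.pyGetD Q i 0))
      (PySem.Dict.empty, [])).2

-- ===== PRECONDITION & SPEC =====
-- Pre_ excludes the inputs where one of the programs raises: zero divisors among the first M
-- queries (ZeroDivisionError, reachable when 0 < N), and N > len(A) or M > len(Q), on which
-- indexing the prefixes raises IndexError in B always and in A unless the other loop is empty.
def Pre_getMaxandMinProduct (A : List Int) (Q : List Int) (N : Int) (M : Int) : Prop :=
  N ≤ (A.length : Int) ∧ M ≤ (Q.length : Int) ∧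
    (0 < N → ∀ q ∈ Q.take M.toNat, q ≠ 0)
instance (A : List Int) (Q : List Int) (N : Int) (M : Int) : Decidable (Pre_getMaxandMinProduct A Q N M) := by unfold Pre_getMaxandMinProduct; infer_instance

def pvWitness_getMaxandMinProduct : List Int × List Int × Int × Int := ([6, 4], [2, 3], 2, 2)

def Spec_getMaxandMinProduct (A : List Int) (Q : List Int) (N : Int) (M : Int) (out : List Int) : Prop := out = getMaxandMinProduct_alt A Q N M
instance (A : List Int) (Q : List Int) (N : Int) (M : Int) (out : List Int) : Decidable (Spec_getMaxandMinProduct A Q N M out) := by unfold Spec_getMaxandMinProduct; infer_instance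

-- ===== CLAIM (what is proved, stated in full; the proofs are below) =====
def Claim_equal_getMaxandMinProduct : Prop := ∀ (A : List Int) (Q : List Int) (N : Int) (M : Int), Dom_getMaxandMinProduct A Q N M → Pre_getMaxandMinProduct A Q N M → Spec_getMaxandMinProduct A Q N M (getMaxandMinProduct A Q N M)

-- ===== LEMMAS AND PROOFS =====

-- a fold over range(n) reading xs[j] is a fold over the prefix xs.take n
theorem pv_foldl_pyRange_take {α β : Type} (xs : List α) (d : α) (f : β → α → β) :
    ∀ (n : Nat), n ≤ xs.length → ∀ (init : β),
      (PySem.List.pyRange 0 (n : Int) 1).foldl (fun acc j => f acc (PySem.List.pyGetD xs j d)) init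
        = (xs.take n).foldl f init := by
  intro n
  induction n with
  | zero => intro _ init; simp [PySem.List.pyRange_one_eq_nil]
  | succ n ih =>
    intro h init
    have h' : n ≤ xs.length := Nat.le_of_succ_le h
    have hn : n < xs.length := h
    rw [show ((n + 1 : Nat) : Int) = (n : Int) + 1 by push_cast; ring,
        PySem.List.pyRange_one_succ_right (Int.natCast_nonneg n),
        List.foldl_append, ih h' init]
    rw [List.take_add_one, List.getElem?_eq_getElem hn]
    simp only [Option.toList_some, List.foldl_append, List.foldl_cons, List.foldl_nil]
    rw [PySem.List.pyGetD_ofNat xs n d hn]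

-- A computes, per processed query q, the number of elements of A[:N] divisible by q
theorem pv_portA_eq_map (A Q : List Int) (n m : Nat)
    (hA : n ≤ A.length) (hQ : m ≤ Q.length) :
    getMaxandMinProduct A Q (n : Int) (m : Int)
      = (Q.take m).map
          (fun q => ((A.take n).countP (fun a => decide (PySem.Int.mod a q = 0)) : Int)) := by
  unfold getMaxandMinProduct
  rw [pv_foldl_pyRange_take Q 0
        (fun count q => count ++ [(PySem.List.pyRange 0 (n : Int) 1).foldl
          (fun c j => if PySem.Int.mod (PySem.List.pyGetD A j 0) q = 0 then c + 1 else c) 0])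
        m hQ]
  rw [PySem.List.foldl_append_singleton_eq_map]
  simp only [List.nil_append]
  refine List.map_congr_left (fun q _ => ?_)
  rw [pv_foldl_pyRange_take A 0
        (fun c a => if PySem.Int.mod a q = 0 then c + 1 else c) n hA 0]
  have := PySem.List.foldl_count_if (fun a => decide (PySem.Int.mod a q = 0)) (A.take n) 0
  simpa using this

-- summing the Counter's multiplicities over the divisible distinct values counts the divisible elements
theorem pv_sumDiv_counter (l : List Int) (q : Int) :
    pvSumDiv (PySem.Dict.counter l).items q
      = (l.countP (fun a => decide (PySem.Int.mod a q = 0)) : Int) := by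
  have hstep : pvSumDiv (PySem.Dict.counter l).items q
      = ((PySem.Dict.counter l).items.map
          (fun p => if PySem.Int.mod p.1 q = 0 then p.2 else 0)).sum := by
    unfold pvSumDiv
    rw [PySem.List.foldl_congr_mem (PySem.Dict.counter l).items _
        (fun acc p => acc + if PySem.Int.mod p.1 q = 0 then p.2 else 0) 0
        (fun acc p _ => by by_cases h : PySem.Int.mod p.1 q = 0 <;> simp [h]),
      PySem.List.foldl_add, zero_add]
  rw [hstep, PySem.Dict.items_counter, List.map_map]
  have hperm : (PySem.Set.ofList l).Perm l.dedup := by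
    refine List.perm_of_nodup_nodup_toFinset_eq (PySem.Set.nodup_ofList l) l.nodup_dedup ?_
    ext x
    simp [List.mem_toFinset, PySem.Set.mem_ofList, List.mem_dedup]
  calc ((PySem.Set.ofList l).map
          ((fun p : Int × Int => if PySem.Int.mod p.1 q = 0 then p.2 else 0) ∘
            fun k => (k, (l.count k : Int)))).sum
      = (l.dedup.map
          (fun k => if PySem.Int.mod k q = 0 then (l.count k : Int) else 0)).sum :=
        (hperm.map _).sum_eq
    _ = ((l.dedup.filter (fun a => decide (PySem.Int.mod a q = 0))).map
          (fun k => (l.count k : Int))).sum := by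
        induction l.dedup with
        | nil => simp
        | cons x xs ih =>
          by_cases h : PySem.Int.mod x q = 0 <;> simp [h, ih]
    _ = (l.countP (fun a => decide (PySem.Int.mod a q = 0)) : Int) := by
        rw [← List.sum_map_count_dedup_filter_eq_countP
              (fun a => decide (PySem.Int.mod a q = 0)) l,
            Nat.cast_list_sum, List.map_map]
        rfl

-- B's memoizing query loop returns exactly the per-query values
theorem pv_cacheLoop (F : Int → Int) :
    ∀ (qs : List Int) (cache : PySem.Dict Int Int) (res : List Int),
      (∀ q s, cache.get? q = some s → s = F q) →
      (qs.foldl (pvStep F) (cache, res)).2 = res ++ qs.map F := by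
  intro qs
  induction qs with
  | nil => intro cache res _; simp
  | cons q qs ih =>
    intro cache res hc
    simp only [List.foldl_cons, List.map_cons]
    cases hget : cache.get? q with
    | none =>
      have : pvStep F (cache, res) q = (cache.insert q (F q), res ++ [F q]) := by
        simp [pvStep, hget]
      rw [this, ih _ _ (fun q' s hs => by
        rw [PySem.Dict.get?_insert] at hs
        by_cases hq : q' = q
        · simp [hq] at hs; simp [hq, ← hs]
        · exact hc q' s (by simpa [hq] using hs))]
      simp
    | some s =>
      have hs : s = F q := hc q s hget
      have : pvStep F (cache, res) q = (cache, res ++ [s]) := by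
        simp [pvStep, hget]
      rw [this, ih _ _ hc, hs]
      simp

-- reading xs[j] over range(n) yields the prefix xs.take n
theorem pv_map_pyRange_take {α : Type} (xs : List α) (d : α) :
    ∀ (n : Nat), n ≤ xs.length →
      (PySem.List.pyRange 0 (n : Int) 1).map (fun j => PySem.List.pyGetD xs j d) = xs.take n := by
  intro n
  induction n with
  | zero => intro _; simp [PySem.List.pyRange_one_eq_nil]
  | succ n ih =>
    intro h
    have h' : n ≤ xs.length := Nat.le_of_succ_le h
    have hn : n < xs.length := h
    rw [show ((n + 1 : Nat) : Int) = (n : Int) + 1 by push_cast; ring,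
        PySem.List.pyRange_one_succ_right (Int.natCast_nonneg n),
        List.map_append, ih h']
    rw [List.take_add_one, List.getElem?_eq_getElem hn]
    simp only [List.map_cons, List.map_nil, Option.toList_some]
    rw [PySem.List.pyGetD_ofNat xs n d hn]

-- B equals the same map of per-query counts
theorem pv_portB_eq_map (A Q : List Int) (n m : Nat)
    (hA : n ≤ A.length) (hQ : m ≤ Q.length) :
    getMaxandMinProduct_alt A Q (n : Int) (m : Int)
      = (Q.take m).map
          (fun q => ((A.take n).countP (fun a => decide (PySem.Int.mod a q = 0)) : Int)) := by
  show ((PySem.List.pyRange 0 (m : Int) 1).foldl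
      (fun st i => pvStep
        (fun q => pvSumDiv (PySem.Dict.counter
          ((PySem.List.pyRange 0 (n : Int) 1).map (fun j => PySem.List.pyGetD A j 0))).items q)
        st (PySem.List.pyGetD Q i 0))
      (PySem.Dict.empty, [])).2 = _
  rw [pv_map_pyRange_take A 0 n hA,
      pv_foldl_pyRange_take Q 0
        (pvStep (fun q => pvSumDiv (PySem.Dict.counter (A.take n)).items q)) m hQ,
      pv_cacheLoop _ (Q.take m) PySem.Dict.empty []
        (fun q s hs => by simp [PySem.Dict.get?_empty] at hs)]
  simp only [List.nil_append]
  exact List.map_congr_left (fun q _ => pv_sumDiv_counter (A.take n) q)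

-- a range(n) loop only sees n through the (possibly negative) bound: clamp it to toNat
theorem pv_range_toNat (N : Int) :
    PySem.List.pyRange 0 N 1 = PySem.List.pyRange 0 ((N.toNat : Nat) : Int) 1 := by
  by_cases h : 0 ≤ N
  · rw [Int.toNat_of_nonneg h]
  · rw [PySem.List.pyRange_one_eq_nil (by omega),
        PySem.List.pyRange_one_eq_nil (by omega)]

-- ===== VERDICT (by name: the statement is the Claim_ definition above) =====
theorem getMaxandMinProduct_spec : Claim_equal_getMaxandMinProduct := by
  intro A Q N M _ hPre
  obtain ⟨hNA, hMQ, -⟩ := hPre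
  unfold Spec_getMaxandMinProduct
  have hA' : getMaxandMinProduct A Q N M
      = getMaxandMinProduct A Q ((N.toNat : Nat) : Int) ((M.toNat : Nat) : Int) := by
    unfold getMaxandMinProduct; rw [← pv_range_toNat N, ← pv_range_toNat M]
  have hB' : getMaxandMinProduct_alt A Q N M
      = getMaxandMinProduct_alt A Q ((N.toNat : Nat) : Int) ((M.toNat : Nat) : Int) := by
    unfold getMaxandMinProduct_alt; rw [← pv_range_toNat N, ← pv_range_toNat M]
  rw [hA', hB',
      pv_portA_eq_map A Q N.toNat M.toNat (Int.toNat_le.mpr hNA) (Int.toNat_le.mpr hMQ),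
      pv_portB_eq_map A Q N.toNat M.toNat (Int.toNat_le.mpr hNA) (Int.toNat_le.mpr hMQ)]
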